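-- pv_equiv track=rewrite | github.com/fernandoseara/p2pfl | p2pfl/workflow/diagram.py | _ascii_diagram
-- ===== SOURCE A (Python) =====
-- def _ascii_diagram(
--     transitions: dict[str, set[str | None]],
--     initial_stage: str,
--     dynamic_stages: set[str],
-- ) -> str:
--     """Generate a simple ASCII diagram."""
--     lines: list[str] = []
--     lines.append(f"Workflow: [{initial_stage}] (start)")
--     lines.append("")
--
--     # BFS order for readability
--     visited: set[str] = set()
--     queue = [initial_stage]
--     while queue:
--         current = queue.pop(0)
--         if current in visited:
--             continue
--         visited.add(current)
--
--         targets = transitions.get(current, set())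
--         target_strs: list[str] = []
--         for t in sorted(targets, key=lambda x: x or "~~~"):
--             if t is None:
--                 target_strs.append("[END]")
--             else:
--                 target_strs.append(t)
--                 if t not in visited:
--                     queue.append(t)
--
--         arrow = " --> " + ", ".join(target_strs) if target_strs else " --> (no returns found)"
--         prefix = "* " if current in dynamic_stages else "  "
--         lines.append(f"{prefix}{current}{arrow}")
--
--     # Legend
--     unreachable = set(transitions.keys()) - visited
--     if unreachable:
--         lines.append("")
--         lines.append(f"  UNREACHABLE: {', '.join(sorted(unreachable))}")
--
--     if dynamic_stages:
--         lines.append("")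
--         lines.append("  * = has dynamic returns (cannot fully validate)")
--
--     return "\n".join(lines)
-- ===== SOURCE B (Python) =====
-- def _ascii_diagram(transitions, initial_stage, dynamic_stages):
--     skey = lambda x: x or "~~~"
--     # Pass 1: pure BFS over an index-pointer queue (no pop(0)), collecting visitation order.
--     visited = set()
--     order = []
--     queue = [initial_stage]
--     i = 0
--     while i < len(queue):
--         current = queue[i]
--         i += 1
--         if current in visited:
--             continue
--         visited.add(current)
--         order.append(current)
--         for t in sorted(transitions.get(current, ()), key=skey):
--             if t is not None and t not in visited:
--                 queue.append(t)
--
--     # Pass 2: render one line per visited node.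
--     def render(node):
--         ts = ["[END]" if t is None else t for t in sorted(transitions.get(node, ()), key=skey)]
--         arrow = " --> " + ", ".join(ts) if ts else " --> (no returns found)"
--         return ("* " if node in dynamic_stages else "  ") + node + arrow
--
--     lines = [f"Workflow: [{initial_stage}] (start)", ""] + [render(n) for n in order]
--     unreachable = set(transitions) - visited
--     if unreachable:
--         lines += ["", "  UNREACHABLE: " + ", ".join(sorted(unreachable))]
--     if dynamic_stages:
--         lines += ["", "  * = has dynamic returns (cannot fully validate)"]
--     return "\n".join(lines)
-- ===== Notes on version B (the rewrite author's own statement) =====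
-- stated objective: alternative
-- what changed: A's single fused loop that pops queue[0] and renders each line inline is split into a pure BFS pass over an index-pointer queue (no pop(0), order list collected) followed by a separate rendering map over the visitation order, with the legend assembled as appended sections.
import Mathlib
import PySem

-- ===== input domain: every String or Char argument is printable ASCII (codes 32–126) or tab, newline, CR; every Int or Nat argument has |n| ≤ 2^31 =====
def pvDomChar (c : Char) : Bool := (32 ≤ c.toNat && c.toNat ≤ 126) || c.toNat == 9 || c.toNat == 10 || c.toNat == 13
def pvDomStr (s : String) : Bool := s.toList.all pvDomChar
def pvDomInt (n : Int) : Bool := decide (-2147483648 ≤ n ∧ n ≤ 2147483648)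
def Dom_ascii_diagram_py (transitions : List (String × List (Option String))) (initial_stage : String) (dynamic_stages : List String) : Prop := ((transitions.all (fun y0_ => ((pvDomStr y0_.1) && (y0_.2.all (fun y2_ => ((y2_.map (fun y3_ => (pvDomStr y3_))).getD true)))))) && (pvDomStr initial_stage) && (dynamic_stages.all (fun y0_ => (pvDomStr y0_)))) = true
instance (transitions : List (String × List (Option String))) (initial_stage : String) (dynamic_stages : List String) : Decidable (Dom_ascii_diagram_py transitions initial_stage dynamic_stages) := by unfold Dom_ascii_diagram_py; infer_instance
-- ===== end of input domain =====

-- B decomposes A's fused BFS-and-render loop into a pure BFS pass (index-pointer queue, no pop(0))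
-- followed by a separate rendering map; equal return value, structurally different (objective: alternative).

-- ===== PORT A =====
-- sorted key: lambda x: x or "~~~"
def pvKey (t : Option String) : String :=
  match t with
  | none => "~~~"
  | some s => if s == "" then "~~~" else s

-- fuel bound: the loop pops one item per iteration and never enqueues more than
-- 1 + (total number of targets in transitions) items; always sufficient, never reached.
def pvFuel (transitions : List (String × List (Option String))) : Nat :=
  transitions.foldl (fun a p => a + p.2.length) 2

-- A's while-loop: state (visited, queue, lines); builds target_strs, enqueues and renders inline.
def pvLoopA (d : PySem.Dict String (List (Option String))) (dyn : PySem.Set String) :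
    Nat → PySem.Set String → List String → List String → (List String × PySem.Set String)
  | 0, visited, _, lines => (lines, visited)
  | _ + 1, visited, [], lines => (lines, visited)
  | n + 1, visited, current :: queue, lines =>
    if PySem.Set.contains visited current then
      pvLoopA d dyn n visited queue lines
    else
      let visited' := PySem.Set.add visited current
      let targets := PySem.Set.ofList (d.getD current [])
      let step := (PySem.List.sorted targets pvKey).foldl
        (fun (acc : List String × List String) t =>
          match t with
          | none => (acc.1 ++ ["[END]"], acc.2)
          | some s => (acc.1 ++ [s], if PySem.Set.contains visited' s then acc.2 else acc.2 ++ [s]))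
        ([], queue)
      let arrow := if step.1 ≠ [] then " --> " ++ PySem.Str.join ", " step.1 else " --> (no returns found)"
      let pre := if PySem.Set.contains dyn current then "* " else "  "
      pvLoopA d dyn n visited' step.2 (lines ++ [pre ++ current ++ arrow])

def ascii_diagram_py (transitions : List (String × List (Option String))) (initial_stage : String) (dynamic_stages : List String) : String :=
  let d := PySem.Dict.ofList transitions
  let dyn := PySem.Set.ofList dynamic_stages
  let r := pvLoopA d dyn (pvFuel transitions) PySem.Set.empty [initial_stage]
    ["Workflow: [" ++ initial_stage ++ "] (start)", ""]
  let unreachable := PySem.Set.diff (PySem.Set.ofList d.keys) r.2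
  let lines₁ := if unreachable ≠ [] then
      r.1 ++ ["", "  UNREACHABLE: " ++ PySem.Str.join ", " (PySem.List.sorted unreachable (fun x => x))]
    else r.1
  let lines₂ := if dyn ≠ [] then
      lines₁ ++ ["", "  * = has dynamic returns (cannot fully validate)"]
    else lines₁
  PySem.Str.join "\n" lines₂

-- ===== PORT B =====
-- pass 1: pure BFS; queue is a growing list read through index i (no pop); returns (order, visited)
def pvBfsB (d : PySem.Dict String (List (Option String))) :
    Nat → PySem.Set String → List String → Nat → List String → (List String × PySem.Set String)
  | 0, visited, _, _, order => (order, visited)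
  | n + 1, visited, queue, i, order =>
    if h : i < queue.length then
      let current := queue[i]
      if PySem.Set.contains visited current then
        pvBfsB d n visited queue (i + 1) order
      else
        let visited' := PySem.Set.add visited current
        let queue' := (PySem.List.sorted (PySem.Set.ofList (d.getD current [])) pvKey).foldl
          (fun q t =>
            match t with
            | none => q
            | some s => if PySem.Set.contains visited' s then q else q ++ [s])
          queue
        pvBfsB d n visited' queue' (i + 1) (order ++ [current])
    else (order, visited)

-- pass 2: render one line for one node
def pvRenderB (d : PySem.Dict String (List (Option String))) (dyn : PySem.Set String) (node : String) : String :=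
  let ts := (PySem.List.sorted (PySem.Set.ofList (d.getD node [])) pvKey).map
    (fun t => match t with | none => "[END]" | some s => s)
  let arrow := if ts ≠ [] then " --> " ++ PySem.Str.join ", " ts else " --> (no returns found)"
  (if PySem.Set.contains dyn node then "* " else "  ") ++ node ++ arrow

def ascii_diagram_py_alt (transitions : List (String × List (Option String))) (initial_stage : String) (dynamic_stages : List String) : String :=
  let d := PySem.Dict.ofList transitions
  let dyn := PySem.Set.ofList dynamic_stages
  let r := pvBfsB d (pvFuel transitions) PySem.Set.empty [initial_stage] 0 []
  let unreachable := PySem.Set.diff (PySem.Set.ofList d.keys) r.2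
  let lines := ["Workflow: [" ++ initial_stage ++ "] (start)", ""]
    ++ r.1.map (pvRenderB d dyn)
    ++ (if unreachable ≠ [] then
          ["", "  UNREACHABLE: " ++ PySem.Str.join ", " (PySem.List.sorted unreachable (fun x => x))]
        else [])
    ++ (if dyn ≠ [] then ["", "  * = has dynamic returns (cannot fully validate)"] else [])
  PySem.Str.join "\n" lines

-- ===== PRECONDITION & SPEC =====
def Spec_ascii_diagram_py (transitions : List (String × List (Option String))) (initial_stage : String) (dynamic_stages : List String) (out : String) : Prop := out = ascii_diagram_py_alt transitions initial_stage dynamic_stages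
instance (transitions : List (String × List (Option String))) (initial_stage : String) (dynamic_stages : List String) (out : String) : Decidable (Spec_ascii_diagram_py transitions initial_stage dynamic_stages out) := by unfold Spec_ascii_diagram_py; infer_instance

-- ===== CLAIM (what is proved, stated in full; the proofs are below) =====
def Claim_equal_ascii_diagram_py : Prop := ∀ (transitions : List (String × List (Option String))) (initial_stage : String) (dynamic_stages : List String), Dom_ascii_diagram_py transitions initial_stage dynamic_stages → Spec_ascii_diagram_py transitions initial_stage dynamic_stages (ascii_diagram_py transitions initial_stage dynamic_stages)

-- ===== LEMMAS AND PROOFS =====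

-- A's inner pair-fold splits: the first component is B's rendered-targets map, the second is B's enqueue fold.
theorem pvFold_split (v : PySem.Set String) (l : List (Option String)) (a q : List String) :
    l.foldl
      (fun (acc : List String × List String) t =>
        match t with
        | none => (acc.1 ++ ["[END]"], acc.2)
        | some s => (acc.1 ++ [s], if PySem.Set.contains v s then acc.2 else acc.2 ++ [s]))
      (a, q)
    = (a ++ l.map (fun t => match t with | none => "[END]" | some s => s),
       l.foldl (fun q t =>
         match t with
         | none => q
         | some s => if PySem.Set.contains v s then q else q ++ [s]) q) := by
  induction l generalizing a q with
  | nil => simp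
  | cons t l ih =>
    cases t with
    | none => simp only [List.foldl_cons]; rw [ih]; simp
    | some s => simp only [List.foldl_cons]; rw [ih]; simp

-- the enqueue fold only appends: starting it from q ++ r prepends q unchanged
theorem pvEnq_append (v : PySem.Set String) (l : List (Option String)) :
    ∀ (q r : List String),
    l.foldl (fun q t =>
      match t with
      | none => q
      | some s => if PySem.Set.contains v s then q else q ++ [s]) (q ++ r)
    = q ++ l.foldl (fun q t =>
      match t with
      | none => q
      | some s => if PySem.Set.contains v s then q else q ++ [s]) r := by
  induction l with
  | nil => intro q r; simp
  | cons t l ih =>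
    intro q r
    cases t with
    | none => simp only [List.foldl_cons]; exact ih q r
    | some s =>
      simp only [List.foldl_cons]
      by_cases hs : PySem.Set.contains v s
      · simp only [hs, if_true]; exact ih q r
      · simp only [hs, Bool.false_eq_true, if_false, List.append_assoc]
        exact ih q (r ++ [s])

theorem pvEnq_eq_append (v : PySem.Set String) (l : List (Option String)) (q : List String) :
    l.foldl (fun q t =>
      match t with
      | none => q
      | some s => if PySem.Set.contains v s then q else q ++ [s]) q
    = q ++ l.foldl (fun q t =>
      match t with
      | none => q
      | some s => if PySem.Set.contains v s then q else q ++ [s]) [] := by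
  simpa using pvEnq_append v l q []

-- main simulation: A's fused loop = B's BFS pass followed by the rendering map
theorem pvLoop_sim (d : PySem.Dict String (List (Option String))) (dyn : PySem.Set String) :
    ∀ (n : Nat) (visited : PySem.Set String) (queue : List String) (i : Nat)
      (order lines : List String), i ≤ queue.length →
    pvLoopA d dyn n visited (queue.drop i) (lines ++ order.map (pvRenderB d dyn))
      = (lines ++ ((pvBfsB d n visited queue i order).1).map (pvRenderB d dyn),
         (pvBfsB d n visited queue i order).2) := by
  intro n
  induction n with
  | zero => intro visited queue i order lines _; simp [pvLoopA, pvBfsB]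
  | succ n ih =>
    intro visited queue i order lines hi
    by_cases h : i < queue.length
    · rw [List.drop_eq_getElem_cons h]
      by_cases hv : PySem.Set.contains visited queue[i]
      · simp only [pvLoopA, pvBfsB, h, hv, dif_pos, if_pos]
        exact ih visited queue (i + 1) order lines h
      · simp only [pvLoopA, pvBfsB, h, hv, dif_pos, Bool.false_eq_true, if_neg,
          not_false_eq_true, pvFold_split]
        rw [pvEnq_eq_append, ← List.drop_append_of_le_length h,
          ← pvEnq_eq_append]
        have hstep := ih (PySem.Set.add visited queue[i])
          ((PySem.List.sorted (PySem.Set.ofList (d.getD queue[i] [])) pvKey).foldl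
            (fun q t =>
              match t with
              | none => q
              | some s => if PySem.Set.contains (PySem.Set.add visited queue[i]) s then q
                  else q ++ [s]) queue)
          (i + 1) (order ++ [queue[i]]) lines
          (by rw [pvEnq_eq_append]; simp; omega)
        simpa [pvRenderB, List.map_append] using hstep
    · have hd : queue.drop i = [] := List.drop_eq_nil_of_le (le_of_not_gt h)
      simp [pvLoopA, pvBfsB, hd, h]

-- ===== VERDICT (by name: the statement is the Claim_ definition above) =====
theorem ascii_diagram_py_spec : Claim_equal_ascii_diagram_py := by
  intro transitions initial_stage dynamic_stages _
  unfold Spec_ascii_diagram_py ascii_diagram_py ascii_diagram_py_alt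
  have hsim := pvLoop_sim (PySem.Dict.ofList transitions) (PySem.Set.ofList dynamic_stages)
    (pvFuel transitions) PySem.Set.empty [initial_stage] 0 []
    ["Workflow: [" ++ initial_stage ++ "] (start)", ""] (by simp)
  simp only [List.drop_zero, List.map_nil, List.append_nil] at hsim
  simp only [hsim]
  split_ifs <;> simp
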